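-- pv_equiv track=rewrite | github.com/rochaadouglas/Python | UFSC/introd-PO/matriz_somatorio.py | retornaLista2
-- ===== SOURCE A (Python) =====
-- def retornaLista2(matriz):
--     tam = len(matriz)
--     linha = 0
--     referencia = len(matriz[0])
--     while linha < tam:
--         qtcoluna = len(matriz[linha])
--         if qtcoluna != referencia:
--             return []
--         linha += 1
--     return [linha, referencia]
-- ===== SOURCE B (Python) =====
-- def retornaLista2(matriz):
--     referencia = len(matriz[0])
--     lengths = {len(row) for row in matriz}
--     if len(lengths) == 1:
--         return [len(matriz), referencia]
--     return []
-- ===== Notes on version B (the rewrite author's own statement) =====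
-- stated objective: simpler
-- what changed: Replaces the indexed while-loop with early return by a single set comprehension over row lengths, deciding uniformity after the full scan by whether the set of distinct lengths is a singleton.
import Mathlib
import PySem

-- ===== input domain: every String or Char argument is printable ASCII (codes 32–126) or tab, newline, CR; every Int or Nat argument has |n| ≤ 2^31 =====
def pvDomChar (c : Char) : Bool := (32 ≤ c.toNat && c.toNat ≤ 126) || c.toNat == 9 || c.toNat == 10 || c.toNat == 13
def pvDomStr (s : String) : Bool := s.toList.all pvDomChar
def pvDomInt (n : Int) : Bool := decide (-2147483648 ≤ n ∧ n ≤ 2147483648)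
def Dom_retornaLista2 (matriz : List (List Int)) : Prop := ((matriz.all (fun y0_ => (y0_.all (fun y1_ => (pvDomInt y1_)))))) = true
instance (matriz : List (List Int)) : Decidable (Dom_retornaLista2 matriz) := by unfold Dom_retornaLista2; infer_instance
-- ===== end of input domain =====

-- B replaces A's indexed while-loop with early return by a set of all row lengths,
-- deciding uniformity after the full scan (objective: simpler).

-- ===== PORT A =====
-- the while loop: linha counts up while every row so far matches referencia
def retornaLista2Loop (matriz : List (List Int)) (referencia : Int) (linha : Nat) : List Int :=
  if h : linha < matriz.length then
    let qtcoluna : Int := (matriz[linha].length : Int)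
    if qtcoluna ≠ referencia then []
    else retornaLista2Loop matriz referencia (linha + 1)
  else [(linha : Int), referencia]
termination_by matriz.length - linha

def retornaLista2 (matriz : List (List Int)) : List Int :=
  match PySem.List.pyGet? matriz 0 with
  | none => []   -- len(matriz[0]) raises IndexError in Python; excluded by Pre_
  | some row0 => retornaLista2Loop matriz ((row0.length : Int)) 0

-- ===== PORT B =====
def retornaLista2_alt (matriz : List (List Int)) : List Int :=
  match PySem.List.pyGet? matriz 0 with
  | none => []   -- len(matriz[0]) raises IndexError in Python; excluded by Pre_
  | some row0 =>
    let referencia : Int := (row0.length : Int)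
    let lengths : PySem.Set Int := PySem.Set.ofList (matriz.map (fun row => ((row.length : Int))))
    if PySem.Set.len lengths = 1 then [(matriz.length : Int), referencia] else []

-- ===== PRECONDITION & SPEC =====
-- Pre_ excludes the empty matrix, on which both A and B raise IndexError at len(matriz[0]).
def Pre_retornaLista2 (matriz : List (List Int)) : Prop := matriz ≠ []
instance (matriz : List (List Int)) : Decidable (Pre_retornaLista2 matriz) := by unfold Pre_retornaLista2; infer_instance
def pvWitness_retornaLista2 : List (List Int) := [[1, 2], [3, 4]]

def Spec_retornaLista2 (matriz : List (List Int)) (out : List Int) : Prop := out = retornaLista2_alt matriz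
instance (matriz : List (List Int)) (out : List Int) : Decidable (Spec_retornaLista2 matriz out) := by unfold Spec_retornaLista2; infer_instance

-- ===== CLAIM (what is proved, stated in full; the proofs are below) =====
def Claim_equal_retornaLista2 : Prop := ∀ (matriz : List (List Int)), Dom_retornaLista2 matriz → Pre_retornaLista2 matriz → Spec_retornaLista2 matriz (retornaLista2 matriz)

-- ===== LEMMAS AND PROOFS =====

-- A's loop from index `linha` returns [len, ref] iff every remaining row has length ref
theorem retornaLista2Loop_eq (matriz : List (List Int)) (ref : Int) :
    ∀ (n linha : Nat), linha ≤ matriz.length → matriz.length - linha = n →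
    retornaLista2Loop matriz ref linha =
      if (matriz.drop linha).all (fun row => ((row.length : Int) = ref)) then
        [(matriz.length : Int), ref] else [] := by
  intro n
  induction n with
  | zero =>
    intro linha hle hn
    have h : linha = matriz.length := by omega
    subst h
    rw [retornaLista2Loop]
    simp
  | succ k ih =>
    intro linha hle hn
    have hlt : linha < matriz.length := by omega
    rw [retornaLista2Loop]
    rw [dif_pos hlt]
    have hdrop : matriz.drop linha = matriz[linha] :: matriz.drop (linha + 1) :=
      (List.drop_eq_getElem_cons hlt)
    by_cases hq : ((matriz[linha].length : Int)) = ref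
    · simp only [ite_not, if_pos hq]
      rw [ih (linha + 1) (by omega) (by omega)]
      simp only [hdrop, List.all_cons, hq, decide_true, Bool.true_and]
    · simp only [ite_not, if_neg hq]
      rw [hdrop]
      have hc : ((matriz[linha] :: List.drop (linha + 1) matriz).all
          fun row => decide (((row.length : Int)) = ref)) = false :=
        List.all_eq_false.mpr ⟨matriz[linha], List.mem_cons_self, by simp [hq]⟩
      rw [hc]
      simp

-- a nodup nonempty list all of whose elements equal x is [x]
theorem nodup_all_eq_single {α : Type} (s : List α) (x : α) (hx : x ∈ s)
    (hnd : s.Nodup) (hall : ∀ a ∈ s, a = x) : s = [x] := by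
  match s with
  | [] => cases hx
  | [a] => simp [hall a (by simp)]
  | a :: b :: t =>
    have ha : a = x := hall a (by simp)
    have hb : b = x := hall b (by simp)
    have : a ≠ b := by
      have := hnd
      simp [List.nodup_cons] at this
      tauto
    exact absurd (ha.trans hb.symm) this

-- the set of lengths is a singleton iff every row's length equals the first's
theorem set_len_one_iff (r : List Int) (rest : List (List Int)) :
    (PySem.Set.len (PySem.Set.ofList ((r :: rest).map (fun row => ((row.length : Int))))) = 1)
    ↔ ((r :: rest).all (fun row => ((row.length : Int) = (r.length : Int)))) := by
  set L := (r :: rest).map (fun row => ((row.length : Int))) with hL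
  have hmemref : ((r.length : Int)) ∈ L := by simp [hL]
  constructor
  · intro h1

    obtain ⟨y, hy⟩ : ∃ y, PySem.Set.ofList L = [y] := by
      match hm : PySem.Set.ofList L with
      | [] => simp [PySem.Set.len, hm] at h1
      | [y] => exact ⟨y, rfl⟩
      | a :: b :: t => simp [PySem.Set.len, hm] at h1; omega
    have hally : ∀ a ∈ L, a = y := by
      intro a ha
      have : a ∈ PySem.Set.ofList L := (PySem.Set.mem_ofList L a).mpr ha
      rw [hy] at this; simpa using this
    have hry : ((r.length : Int)) = y := hally _ hmemref
    simp only [List.all_eq_true, decide_eq_true_eq]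
    rintro row hrow
    have : ((row.length : Int)) ∈ L := by rw [hL]; exact List.mem_map_of_mem hrow
    rw [hally _ this, hry]
  · intro hall
    have hally : ∀ a ∈ PySem.Set.ofList L, a = ((r.length : Int)) := by
      intro a ha
      have haL : a ∈ L := (PySem.Set.mem_ofList L a).mp ha
      simp only [hL, List.mem_map] at haL
      obtain ⟨row, hrow, rfl⟩ := haL
      simpa using (List.all_eq_true.mp hall row hrow)
    have := nodup_all_eq_single (PySem.Set.ofList L) ((r.length : Int))
      ((PySem.Set.mem_ofList L _).mpr hmemref) (PySem.Set.nodup_ofList L) hally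
    simp [PySem.Set.len, this]

-- ===== VERDICT (by name: the statement is the Claim_ definition above) =====
theorem retornaLista2_spec : Claim_equal_retornaLista2 := by
  intro matriz _hdom hpre
  unfold Spec_retornaLista2 retornaLista2 retornaLista2_alt
  match matriz, hpre with
  | r :: rest, _ =>
    have hget : PySem.List.pyGet? (r :: rest) (0 : Int) = some r := by
      simp [PySem.List.pyGet?, PySem.List.pyIdx?]
    rw [hget]
    simp only
    rw [retornaLista2Loop_eq (r :: rest) ((r.length : Int)) ((r :: rest).length) 0
      (by omega) (by omega)]
    rw [List.drop_zero]
    by_cases hall : ((r :: rest).all (fun row => ((row.length : Int) = (r.length : Int))))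
    · rw [if_pos (by simpa using hall), if_pos ((set_len_one_iff r rest).mpr hall)]
    · rw [if_neg (by simpa using hall)]
      rw [if_neg (fun h => hall ((set_len_one_iff r rest).mp h))]
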